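-- pv_equiv track=rewrite | github.com/flowmar47/daily-report-backup | src/data_processors/template_generator.py | _format_forex_section
-- ===== SOURCE A (Python) =====
-- def _format_forex_section(forex_alerts: list) -> str:
--     """Format FOREX PAIRS section according to template."""
--     if not forex_alerts:
--         return ""
--
--     section_lines = ["FOREX PAIRS", ""]
--
--     # Filter out invalid pairs (corrupted data from scraping)
--     valid_pairs = []
--     for alert in forex_alerts:
--         pair = alert.get('pair', '')
--         # Skip corrupted pairs like "ALERTS", "AVERAG", "PROFIT", "TRADIN"
--         if pair and len(pair) >= 6 and '/' in pair or pair.upper() in ['EURUSD', 'GBPUSD', 'USDJPY', 'AUDUSD', 'USDCAD', 'USDCHF', 'NZDUSD', 'EURGBP', 'EURJPY', 'GBPJPY']: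
--             valid_pairs.append(alert)
--
--     if not valid_pairs:
--         return "FOREX PAIRS\n\nNo valid forex signals available today."
--
--     for alert in valid_pairs:
--         pair = alert.get('pair', 'N/A')
--         pair_lines = [f"Pair: {pair}"]
--
--         # Extract values with fallback to template placeholders
--         high = alert.get('high', 'N/A')
--         average = alert.get('average', 'N/A')
--         low = alert.get('low', 'N/A')
--         mt4_action = alert.get('signal', alert.get('trade_type', 'N/A'))
--         exit_price = alert.get('exit_price', alert.get('exit', 'N/A'))
--
--         # Format MT4 Action properly
--         if mt4_action and mt4_action != 'N/A':
--             if 'MT4' not in mt4_action.upper():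
--                 mt4_action = f"MT4 {mt4_action}"
--
--         pair_lines.extend([
--             f"High: {high}",
--             f"Average: {average}",
--             f"Low: {low}",
--             f"MT4 Action: {mt4_action}",
--             f"Exit: {exit_price}"
--         ])
--
--         # Add notes if available
--         notes = []
--         if alert.get('trade_status'):
--             notes.append(alert['trade_status'])
--         if alert.get('special_badge'):
--             notes.append(alert['special_badge'])
--
--         if notes:
--             pair_lines.append(f"Notes: {', '.join(notes)}")
--
--         section_lines.extend(pair_lines)
--         section_lines.append("")  # Empty line between pairs
--
--     # Remove trailing empty line
--     if section_lines and section_lines[-1] == "":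
--         section_lines.pop()
--
--     return "\n".join(section_lines)
-- ===== SOURCE B (Python) =====
-- _SYMS = ('EURUSD', 'GBPUSD', 'USDJPY', 'AUDUSD', 'USDCAD',
--          'USDCHF', 'NZDUSD', 'EURGBP', 'EURJPY', 'GBPJPY')
--
--
-- def _format_forex_section(forex_alerts: list) -> str:
--     if not forex_alerts:
--         return ""
--     # Single fused pass: filter, format and accumulate the body string as we go,
--     # instead of A's two staged passes over a flat line list with a trailing pop.
--     body = None
--     for alert in forex_alerts:
--         pair = alert.get('pair', '')
--         if not (pair and len(pair) >= 6 and '/' in pair or pair.upper() in _SYMS):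
--             continue
--         mt4 = alert.get('signal', alert.get('trade_type', 'N/A'))
--         if mt4 and mt4 != 'N/A' and 'MT4' not in mt4.upper():
--             mt4 = 'MT4 ' + mt4
--         block = (
--             'Pair: ' + alert.get('pair', 'N/A')
--             + '\nHigh: ' + alert.get('high', 'N/A')
--             + '\nAverage: ' + alert.get('average', 'N/A')
--             + '\nLow: ' + alert.get('low', 'N/A')
--             + '\nMT4 Action: ' + mt4
--             + '\nExit: ' + alert.get('exit_price', alert.get('exit', 'N/A'))
--         )
--         notes = ', '.join(v for v in (alert.get('trade_status'), alert.get('special_badge')) if v)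
--         if notes:
--             block += '\nNotes: ' + notes
--         body = block if body is None else body + '\n\n' + block
--     if body is None:
--         return 'FOREX PAIRS\n\nNo valid forex signals available today.'
--     return 'FOREX PAIRS\n\n' + body
-- ===== Notes on version B (the rewrite author's own statement) =====
-- stated objective: simpler
-- what changed: Fuses A's two staged passes (filter into valid_pairs, then extend a flat line list with sentinel empty lines and pop the trailing one) into a single pass that formats each valid alert directly by string concatenation into a None-sentinel string accumulator, with no intermediate lists.
import Mathlib
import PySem

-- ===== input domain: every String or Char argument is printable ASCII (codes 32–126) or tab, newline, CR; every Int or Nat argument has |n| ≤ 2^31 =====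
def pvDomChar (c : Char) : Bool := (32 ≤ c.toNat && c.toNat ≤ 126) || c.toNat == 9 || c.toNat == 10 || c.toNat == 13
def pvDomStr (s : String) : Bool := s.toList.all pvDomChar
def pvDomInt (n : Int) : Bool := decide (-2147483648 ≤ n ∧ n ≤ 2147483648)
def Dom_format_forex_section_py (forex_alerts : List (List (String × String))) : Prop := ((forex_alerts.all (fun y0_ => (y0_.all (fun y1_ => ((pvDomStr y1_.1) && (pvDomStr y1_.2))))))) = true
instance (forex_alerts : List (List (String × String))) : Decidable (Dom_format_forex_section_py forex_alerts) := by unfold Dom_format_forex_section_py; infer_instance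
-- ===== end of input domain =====

-- B fuses A's two staged passes (filter into valid_pairs, then append line lists with
-- sentinel empty lines and a trailing pop) into ONE pass that formats each valid alert
-- directly into a string accumulator (objective: simpler).

-- dict.get(k, d) on an association list: first match, else the default (shared dict primitive)
def pvGetD (alert : List (String × String)) (k d : String) : String :=
  match alert.find? (fun kv => kv.1 == k) with
  | some kv => kv.2
  | none => d

def pvValidSymbols : List String :=
  ["EURUSD", "GBPUSD", "USDJPY", "AUDUSD", "USDCAD", "USDCHF", "NZDUSD", "EURGBP", "EURJPY", "GBPJPY"]

-- ===== PORT A =====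

-- the pair_lines block A builds for one alert (the body of A's second loop)
def pvA_pairLines (alert : List (String × String)) : List String :=
  let pair := pvGetD alert "pair" "N/A"
  let pair_lines := ["Pair: " ++ pair]
  let high := pvGetD alert "high" "N/A"
  let average := pvGetD alert "average" "N/A"
  let low := pvGetD alert "low" "N/A"
  let mt4_action := pvGetD alert "signal" (pvGetD alert "trade_type" "N/A")
  let exit_price := pvGetD alert "exit_price" (pvGetD alert "exit" "N/A")
  let mt4_action :=
    if mt4_action != "" && mt4_action != "N/A" then
      (if !(PySem.Str.isIn "MT4" (PySem.Str.upper mt4_action)) then "MT4 " ++ mt4_action else mt4_action)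
    else mt4_action
  let pair_lines := pair_lines ++
    ["High: " ++ high, "Average: " ++ average, "Low: " ++ low,
     "MT4 Action: " ++ mt4_action, "Exit: " ++ exit_price]
  let notes :=
    (if pvGetD alert "trade_status" "" != "" then [pvGetD alert "trade_status" ""] else []) ++
    (if pvGetD alert "special_badge" "" != "" then [pvGetD alert "special_badge" ""] else [])
  if !notes.isEmpty then pair_lines ++ ["Notes: " ++ PySem.Str.join ", " notes] else pair_lines

def format_forex_section_py (forex_alerts : List (List (String × String))) : String :=
  if forex_alerts.isEmpty then ""
  else
    let valid_pairs := forex_alerts.foldl (fun vp alert =>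
      let pair := pvGetD alert "pair" ""
      if (pair != "" && decide (6 ≤ PySem.Str.len pair) && PySem.Str.isIn "/" pair)
          || pvValidSymbols.contains (PySem.Str.upper pair)
      then vp ++ [alert] else vp) []
    if valid_pairs.isEmpty then "FOREX PAIRS\n\nNo valid forex signals available today."
    else
      let section_lines := valid_pairs.foldl
        (fun sl alert => sl ++ pvA_pairLines alert ++ [""]) ["FOREX PAIRS", ""]
      -- 'if section_lines and section_lines[-1] == "": section_lines.pop()' (pop on nonempty = dropLast)
      let section_lines := if section_lines.getLast? = some "" then section_lines.dropLast else section_lines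
      PySem.Str.join "\n" section_lines

-- ===== PORT B =====

def pvB_isValid (alert : List (String × String)) : Bool :=
  let pair := pvGetD alert "pair" ""
  (pair != "" && decide (6 ≤ PySem.Str.len pair) && PySem.Str.isIn "/" pair)
    || pvValidSymbols.contains (PySem.Str.upper pair)

-- one alert's fully formatted block, built by direct string concatenation
def pvB_block (alert : List (String × String)) : String :=
  let mt4 := pvGetD alert "signal" (pvGetD alert "trade_type" "N/A")
  let mt4 :=
    if mt4 != "" && mt4 != "N/A" && !(PySem.Str.isIn "MT4" (PySem.Str.upper mt4)) then "MT4 " ++ mt4 else mt4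
  let block :=
    "Pair: " ++ pvGetD alert "pair" "N/A"
      ++ "\nHigh: " ++ pvGetD alert "high" "N/A"
      ++ "\nAverage: " ++ pvGetD alert "average" "N/A"
      ++ "\nLow: " ++ pvGetD alert "low" "N/A"
      ++ "\nMT4 Action: " ++ mt4
      ++ "\nExit: " ++ pvGetD alert "exit_price" (pvGetD alert "exit" "N/A")
  -- ', '.join(v for v in (alert.get('trade_status'), alert.get('special_badge')) if v)
  -- (an absent key yields None, which is falsy exactly like '')
  let notes := PySem.Str.join ", "
    ([pvGetD alert "trade_status" "", pvGetD alert "special_badge" ""].filter (fun v => v != ""))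
  if notes != "" then block ++ "\nNotes: " ++ notes else block

-- the fused loop: 'body' is None until the first valid alert, then the accumulated text
def pvB_loop (alerts : List (List (String × String))) (body : Option String) : Option String :=
  match alerts with
  | [] => body
  | alert :: rest =>
    if pvB_isValid alert then
      let block := pvB_block alert
      pvB_loop rest (some (match body with | none => block | some s => s ++ "\n\n" ++ block))
    else pvB_loop rest body

def format_forex_section_py_alt (forex_alerts : List (List (String × String))) : String :=
  if forex_alerts.isEmpty then ""
  else
    match pvB_loop forex_alerts none with
    | none => "FOREX PAIRS\n\nNo valid forex signals available today."
    | some body => "FOREX PAIRS\n\n" ++ body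

-- ===== PRECONDITION & SPEC =====
def Spec_format_forex_section_py (forex_alerts : List (List (String × String))) (out : String) : Prop := out = format_forex_section_py_alt forex_alerts
instance (forex_alerts : List (List (String × String))) (out : String) : Decidable (Spec_format_forex_section_py forex_alerts out) := by unfold Spec_format_forex_section_py; infer_instance

-- ===== CLAIM (what is proved, stated in full; the proofs are below) =====
def Claim_equal_format_forex_section_py : Prop := ∀ (forex_alerts : List (List (String × String))), Dom_format_forex_section_py forex_alerts → Spec_format_forex_section_py forex_alerts (format_forex_section_py forex_alerts)

-- ===== LEMMAS AND PROOFS =====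

theorem pv_mt4_eq (m : String) :
    (if m != "" && m != "N/A" then
      (if !(PySem.Str.isIn "MT4" (PySem.Str.upper m)) then "MT4 " ++ m else m)
     else m) =
    (if m != "" && m != "N/A" && !(PySem.Str.isIn "MT4" (PySem.Str.upper m)) then "MT4 " ++ m else m) := by
  cases h1 : (m != "" && m != "N/A") <;>
    cases h2 : (!(PySem.Str.isIn "MT4" (PySem.Str.upper m))) <;> simp [h1, h2]

-- String-level join facts (lifted from the Chars lemmas)
theorem pv_str_join_singleton (sep a : String) : PySem.Str.join sep [a] = a := by
  apply String.toList_inj.mp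
  rw [PySem.Str.toList_join]
  simp [PySem.Chars.join_singleton]

theorem pv_str_join_cons_cons (sep a b : String) (rest : List String) :
    PySem.Str.join sep (a :: b :: rest) = a ++ sep ++ PySem.Str.join sep (b :: rest) := by
  apply String.toList_inj.mp
  rw [String.toList_append, String.toList_append, PySem.Str.toList_join, PySem.Str.toList_join]
  simp [PySem.Chars.join_cons_cons]

theorem pv_str_ne_empty (s : String) (h : s.toList ≠ []) : (s != "") = true := by
  simp only [bne_iff_ne, ne_eq]
  intro h'
  apply h
  rw [h']
  rfl

-- splitting a '\n'-joined line list out of B's concatenated block (no Notes line)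
theorem pv_block_join6 (p h a l m e : String) :
    ("Pair: " ++ p ++ "\nHigh: " ++ h ++ "\nAverage: " ++ a ++ "\nLow: " ++ l
      ++ "\nMT4 Action: " ++ m ++ "\nExit: " ++ e).toList =
    PySem.Chars.join ['\n'] [("Pair: " ++ p).toList, ("High: " ++ h).toList,
      ("Average: " ++ a).toList, ("Low: " ++ l).toList, ("MT4 Action: " ++ m).toList,
      ("Exit: " ++ e).toList] := by
  have e1 : ("\nHigh: " : String).toList = '\n' :: ("High: " : String).toList := by decide
  have e2 : ("\nAverage: " : String).toList = '\n' :: ("Average: " : String).toList := by decide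
  have e3 : ("\nLow: " : String).toList = '\n' :: ("Low: " : String).toList := by decide
  have e4 : ("\nMT4 Action: " : String).toList = '\n' :: ("MT4 Action: " : String).toList := by decide
  have e5 : ("\nExit: " : String).toList = '\n' :: ("Exit: " : String).toList := by decide
  simp [PySem.Chars.join_cons_cons, PySem.Chars.join_singleton, String.toList_append,
    e1, e2, e3, e4, e5, List.append_assoc]

-- the same with a trailing Notes line
theorem pv_block_join7 (p h a l m e n : String) :
    ("Pair: " ++ p ++ "\nHigh: " ++ h ++ "\nAverage: " ++ a ++ "\nLow: " ++ l
      ++ "\nMT4 Action: " ++ m ++ "\nExit: " ++ e ++ "\nNotes: " ++ n).toList =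
    PySem.Chars.join ['\n'] [("Pair: " ++ p).toList, ("High: " ++ h).toList,
      ("Average: " ++ a).toList, ("Low: " ++ l).toList, ("MT4 Action: " ++ m).toList,
      ("Exit: " ++ e).toList, ("Notes: " ++ n).toList] := by
  have e1 : ("\nHigh: " : String).toList = '\n' :: ("High: " : String).toList := by decide
  have e2 : ("\nAverage: " : String).toList = '\n' :: ("Average: " : String).toList := by decide
  have e3 : ("\nLow: " : String).toList = '\n' :: ("Low: " : String).toList := by decide
  have e4 : ("\nMT4 Action: " : String).toList = '\n' :: ("MT4 Action: " : String).toList := by decide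
  have e5 : ("\nExit: " : String).toList = '\n' :: ("Exit: " : String).toList := by decide
  have e6 : ("\nNotes: " : String).toList = '\n' :: ("Notes: " : String).toList := by decide
  simp [PySem.Chars.join_cons_cons, PySem.Chars.join_singleton, String.toList_append,
    e1, e2, e3, e4, e5, e6, List.append_assoc]

-- B's block equals A's line list joined with '\n' (at the char-list level)
theorem pv_join_nil (sep : String) : PySem.Str.join sep [] = "" := rfl

theorem pv_block_toList (alert : List (String × String)) :
    (pvB_block alert).toList = PySem.Chars.join ['\n'] ((pvA_pairLines alert).map String.toList) := by
  simp only [pvB_block, pvA_pairLines]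
  rw [pv_mt4_eq]
  by_cases h1 : pvGetD alert "trade_status" "" = "" <;>
    by_cases h2 : pvGetD alert "special_badge" "" = ""
  · have b1 : (pvGetD alert "trade_status" "" != "") = false := by simp [h1]
    have b2 : (pvGetD alert "special_badge" "" != "") = false := by simp [h2]
    simp only [b1, b2, List.filter_cons, List.filter_nil, if_false, pv_join_nil,
      bne_self_eq_false, Bool.false_eq_true, List.append_nil, List.isEmpty_nil,
      Bool.not_true, List.map]
    exact pv_block_join6 _ _ _ _ _ _
  · have b1 : (pvGetD alert "trade_status" "" != "") = false := by simp [h1]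
    have b2 : (pvGetD alert "special_badge" "" != "") = true := by simp [bne_iff_ne, h2]
    simp only [b1, b2, List.filter_cons, List.filter_nil, if_false, if_true,
      List.nil_append, pv_str_join_singleton, List.isEmpty_cons, Bool.not_false,
      Bool.false_eq_true, Bool.true_eq_false, List.map]
    exact pv_block_join7 _ _ _ _ _ _ _
  · have b1 : (pvGetD alert "trade_status" "" != "") = true := by simp [bne_iff_ne, h1]
    have b2 : (pvGetD alert "special_badge" "" != "") = false := by simp [h2]
    simp only [b1, b2, List.filter_cons, List.filter_nil, if_false, if_true,
      List.append_nil, pv_str_join_singleton, List.isEmpty_cons, Bool.not_false,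
      Bool.false_eq_true, Bool.true_eq_false, List.map]
    exact pv_block_join7 _ _ _ _ _ _ _
  · have b1 : (pvGetD alert "trade_status" "" != "") = true := by simp [bne_iff_ne, h1]
    have b2 : (pvGetD alert "special_badge" "" != "") = true := by simp [bne_iff_ne, h2]
    have hcm : (", " : String).toList = [',', ' '] := by decide
    have bj : (PySem.Str.join ", " [pvGetD alert "trade_status" "", pvGetD alert "special_badge" ""] != "") = true := by
      rw [pv_str_join_cons_cons, pv_str_join_singleton]
      exact pv_str_ne_empty _ (by simp [String.toList_append, hcm])
    simp only [b1, b2, List.filter_cons, List.filter_nil, if_true, List.cons_append,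
      List.nil_append, bj, List.isEmpty_cons, Bool.not_false, List.map]
    exact pv_block_join7 _ _ _ _ _ _ _

-- A's filter fold is a List.filter
theorem pv_filter_fold (l : List (List (String × String))) :
    List.foldl (fun vp alert =>
      let pair := pvGetD alert "pair" ""
      if (pair != "" && decide (6 ≤ PySem.Str.len pair) && PySem.Str.isIn "/" pair)
          || pvValidSymbols.contains (PySem.Str.upper pair)
      then vp ++ [alert] else vp) [] l = l.filter pvB_isValid := by
  have h := PySem.List.foldl_append_if pvB_isValid id l []
  simp only [List.map_id, List.nil_append] at h
  exact h

theorem pv_lines_fold (l : List (List (String × String))) (init : List String) :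
    List.foldl (fun sl alert => sl ++ pvA_pairLines alert ++ [""]) init l =
      init ++ l.flatMap (fun a => pvA_pairLines a ++ [""]) := by
  have h := PySem.List.foldl_append_eq_flatMap (fun a => pvA_pairLines a ++ [""]) l init
  rw [show (fun (sl : List String) alert => sl ++ pvA_pairLines alert ++ [""]) =
        (fun (sl : List String) alert => sl ++ (pvA_pairLines alert ++ [""])) from
      funext fun sl => funext fun a => by rw [List.append_assoc]]
  exact h

theorem pv_flatMap_ne_nil (l : List (List (String × String))) (h : l ≠ []) :
    l.flatMap (fun a => pvA_pairLines a ++ [""]) ≠ [] := by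
  cases l with
  | nil => exact absurd rfl h
  | cons a t => simp

theorem pv_flatMap_getLast (l : List (List (String × String))) (h : l ≠ []) :
    (l.flatMap (fun a => pvA_pairLines a ++ [""])).getLast? = some "" := by
  induction l with
  | nil => exact absurd rfl h
  | cons a t ih =>
    cases t with
    | nil => simp [List.getLast?_append]
    | cons b t' =>
      rw [List.flatMap_cons, List.getLast?_append, ih (by simp)]
      rfl

theorem pv_pairLines_ne_nil (a : List (String × String)) : pvA_pairLines a ≠ [] := by
  simp only [pvA_pairLines]
  split_ifs <;> simp

theorem pv_join_append (sep : List Char) (xs ys : List (List Char)) (hx : xs ≠ []) (hy : ys ≠ []) :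
    PySem.Chars.join sep (xs ++ ys) =
      PySem.Chars.join sep xs ++ sep ++ PySem.Chars.join sep ys := by
  induction xs with
  | nil => exact absurd rfl hx
  | cons x xs ih =>
    cases xs with
    | nil =>
      cases ys with
      | nil => exact absurd rfl hy
      | cons y ys' =>
        simp [PySem.Chars.join_cons_cons, PySem.Chars.join_singleton]
    | cons x2 xs' =>
      rw [List.cons_append, List.cons_append, PySem.Chars.join_cons_cons]
      rw [← List.cons_append, ih (by simp)]
      rw [PySem.Chars.join_cons_cons]
      simp [List.append_assoc]

theorem pv_dropLast_flatMap_ne_nil (b2 : List (List Char)) (rest' : List (List (List Char)))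
    (hb2 : b2 ≠ []) :
    ((b2 :: rest').flatMap (fun b => b ++ [[]])).dropLast ≠ [] := by
  rw [List.flatMap_cons, List.append_assoc,
    List.dropLast_append_of_ne_nil (by simp)]
  simp [hb2]

theorem pv_join_blocks (blocks : List (List (List Char))) (hne : blocks ≠ [])
    (hb : ∀ b ∈ blocks, b ≠ []) :
    PySem.Chars.join ['\n'] ((blocks.flatMap (fun b => b ++ [[]])).dropLast) =
      PySem.Chars.join ['\n', '\n'] (blocks.map (PySem.Chars.join ['\n'])) := by
  induction blocks with
  | nil => exact absurd rfl hne
  | cons b rest ih =>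
    cases rest with
    | nil =>
      rw [List.flatMap_cons, List.flatMap_nil, List.append_nil,
        List.dropLast_append_of_ne_nil (by simp)]
      simp [PySem.Chars.join_singleton]
    | cons b2 rest' =>
      have hflat : ((b2 :: rest').flatMap (fun b => b ++ [[]])) ≠ [] := by simp
      have hD : ((b2 :: rest').flatMap (fun b => b ++ [[]])).dropLast ≠ [] :=
        pv_dropLast_flatMap_ne_nil b2 rest' (hb b2 (by simp))
      rw [List.flatMap_cons, List.dropLast_append_of_ne_nil hflat,
        pv_join_append ['\n'] (b ++ [[]]) _ (by simp) hD,
        pv_join_append ['\n'] b [[]] (hb b (by simp)) (by simp),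
        PySem.Chars.join_singleton,
        ih (by simp) (fun x hx => hb x (List.mem_cons_of_mem _ hx))]
      simp [PySem.Chars.join_cons_cons, PySem.Chars.join_singleton, List.append_assoc]

theorem pv_dropLast_ne_nil_of_valid (valid : List (List (String × String))) (hne : valid ≠ []) :
    ((valid.map (fun a => (pvA_pairLines a).map String.toList)).flatMap (fun b => b ++ [[]])).dropLast ≠ [] := by
  cases valid with
  | nil => exact absurd rfl hne
  | cons a t =>
    rw [List.map_cons]
    exact pv_dropLast_flatMap_ne_nil _ _ (by simpa using pv_pairLines_ne_nil a)

-- the nonempty-valid case of A, expressed with B's per-alert block strings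
theorem pv_main (valid : List (List (String × String))) (hne : valid ≠ []) :
    PySem.Str.join "\n"
      (if (["FOREX PAIRS", ""] ++ valid.flatMap (fun a => pvA_pairLines a ++ [""])).getLast? = some ""
       then (["FOREX PAIRS", ""] ++ valid.flatMap (fun a => pvA_pairLines a ++ [""])).dropLast
       else ["FOREX PAIRS", ""] ++ valid.flatMap (fun a => pvA_pairLines a ++ [""])) =
    "FOREX PAIRS\n\n" ++ PySem.Str.join "\n\n" (valid.map pvB_block) := by
  have hflat := pv_flatMap_ne_nil valid hne
  have hlast : (["FOREX PAIRS", ""] ++ valid.flatMap (fun a => pvA_pairLines a ++ [""])).getLast? = some "" := by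
    rw [List.getLast?_append, pv_flatMap_getLast valid hne]; rfl
  rw [hlast, if_pos rfl, List.dropLast_append_of_ne_nil hflat]
  apply String.toList_inj.mp
  rw [String.toList_append, PySem.Str.toList_join, PySem.Str.toList_join]
  have hmapflat : List.map String.toList
      (["FOREX PAIRS", ""] ++ (valid.flatMap (fun a => pvA_pairLines a ++ [""])).dropLast) =
      "FOREX PAIRS".toList :: [] :: ((valid.map (fun a => (pvA_pairLines a).map String.toList)).flatMap (fun b => b ++ [[]])).dropLast := by
    simp only [List.map_append, List.map_dropLast, List.map_flatMap, List.flatMap_map]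
    simp
  rw [hmapflat]
  have hblocks := pv_join_blocks (valid.map (fun a => (pvA_pairLines a).map String.toList))
    (by simpa using hne)
    (by
      intro b hb
      rw [List.mem_map] at hb
      obtain ⟨a, _, rfl⟩ := hb
      simpa using pv_pairLines_ne_nil a)
  have hnl : ("\n" : String).toList = ['\n'] := rfl
  have hnn : ("\n\n" : String).toList = ['\n', '\n'] := rfl
  rw [hnl, hnn]
  have hmap2 : List.map String.toList (valid.map pvB_block) =
      (valid.map (fun a => (pvA_pairLines a).map String.toList)).map (PySem.Chars.join ['\n']) := by
    rw [List.map_map, List.map_map]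
    refine congrArg (fun f => List.map f valid) ?_
    funext a
    exact pv_block_toList a
  rw [hmap2, ← hblocks]
  have hD := pv_dropLast_ne_nil_of_valid valid hne
  obtain ⟨d, ds, hcons⟩ := List.exists_cons_of_ne_nil hD
  rw [PySem.Chars.join_cons_cons, hcons, PySem.Chars.join_cons_cons, ← hcons]
  have hFP : ("FOREX PAIRS\n\n" : String).toList = "FOREX PAIRS".toList ++ ['\n'] ++ ['\n'] := by decide
  rw [hFP]
  simp [List.append_assoc]

-- join absorbs a glued-in separator
theorem pv_join_glue (sep a b : String) (l : List String) :
    PySem.Str.join sep ((a ++ sep ++ b) :: l) = PySem.Str.join sep (a :: b :: l) := by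
  cases l with
  | nil => rw [pv_str_join_singleton, pv_str_join_cons_cons, pv_str_join_singleton]
  | cons c l' =>
    rw [pv_str_join_cons_cons sep (a ++ sep ++ b) c l',
      pv_str_join_cons_cons sep a b (c :: l'),
      pv_str_join_cons_cons sep b c l']
    apply String.toList_inj.mp
    simp [String.toList_append, List.append_assoc]

-- B's accumulation over a list, starting from an existing body
theorem pv_foldl_join (xs : List (List (String × String))) : ∀ (s : String),
    xs.foldl (fun s a => s ++ "\n\n" ++ pvB_block a) s =
      PySem.Str.join "\n\n" (s :: xs.map pvB_block) := by
  induction xs with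
  | nil => intro s; rw [List.map_nil, List.foldl_nil, pv_str_join_singleton]
  | cons y ys ih =>
    intro s
    rw [List.foldl_cons, ih, List.map_cons, pv_join_glue]

theorem pv_loop_some (l : List (List (String × String))) : ∀ (s : String),
    pvB_loop l (some s) =
      some ((l.filter pvB_isValid).foldl (fun s a => s ++ "\n\n" ++ pvB_block a) s) := by
  induction l with
  | nil => intro s; rfl
  | cons a rest ih =>
    intro s
    by_cases hv : pvB_isValid a
    · simp only [pvB_loop, hv, if_true, List.filter_cons_of_pos hv, List.foldl_cons]
      exact ih (s ++ "\n\n" ++ pvB_block a)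
    · simp only [pvB_loop, hv, if_false, List.filter_cons_of_neg hv]
      exact ih s

theorem pv_loop_none (l : List (List (String × String))) :
    pvB_loop l none =
      if (l.filter pvB_isValid).isEmpty then none
      else some (PySem.Str.join "\n\n" ((l.filter pvB_isValid).map pvB_block)) := by
  induction l with
  | nil => rfl
  | cons a rest ih =>
    by_cases hv : pvB_isValid a
    · simp only [pvB_loop, hv, if_true, List.filter_cons_of_pos hv, List.isEmpty_cons,
        if_false, List.map_cons]
      rw [pv_loop_some, pv_foldl_join]
      simp
    · simp only [pvB_loop, hv, if_false, List.filter_cons_of_neg hv]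
      exact ih

-- ===== VERDICT (by name: the statement is the Claim_ definition above) =====
theorem format_forex_section_py_spec : Claim_equal_format_forex_section_py := by
  intro alerts _hdom
  unfold Spec_format_forex_section_py
  unfold format_forex_section_py format_forex_section_py_alt
  by_cases he : alerts.isEmpty
  · simp [he]
  · simp only [he, if_false]
    rw [pv_filter_fold, pv_lines_fold, pv_loop_none]
    by_cases hv : (alerts.filter pvB_isValid).isEmpty
    · simp [hv]
    · simp only [hv, if_false]
      have hne : alerts.filter pvB_isValid ≠ [] := by
        intro h; rw [h] at hv; exact hv rfl
      exact pv_main (alerts.filter pvB_isValid) hne
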